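-- pv_equiv track=rewrite | github.com/jacobptnguyen/ticTacConnect | ticTacConnect.py | isTwoNums
-- ===== SOURCE A (Python) =====
-- def isTwoNums(userInput):
--     count = 0
--     prevCharWasNum = True
--     for c in userInput:
--         try:
--             int(c)
--             prevCharWasNum = True
--         except:
--             if prevCharWasNum:
--                 count += 1
--                 prevCharWasNum = False
--     return count == 1
-- ===== SOURCE B (Python) =====
-- import re
--
-- def isTwoNums(userInput):
--     return bool(re.fullmatch(r'\d*\D+\d*', userInput))
-- ===== Notes on version B (the rewrite author's own statement) =====
-- stated objective: idiomatic
-- what changed: Replaced the stateful loop (group counter + prevCharWasNum flag) with a single regex fullmatch of the pattern digits*, nondigits+, digits*, which accepts iff the string contains exactly one maximal nondigit run.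
import Mathlib
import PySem

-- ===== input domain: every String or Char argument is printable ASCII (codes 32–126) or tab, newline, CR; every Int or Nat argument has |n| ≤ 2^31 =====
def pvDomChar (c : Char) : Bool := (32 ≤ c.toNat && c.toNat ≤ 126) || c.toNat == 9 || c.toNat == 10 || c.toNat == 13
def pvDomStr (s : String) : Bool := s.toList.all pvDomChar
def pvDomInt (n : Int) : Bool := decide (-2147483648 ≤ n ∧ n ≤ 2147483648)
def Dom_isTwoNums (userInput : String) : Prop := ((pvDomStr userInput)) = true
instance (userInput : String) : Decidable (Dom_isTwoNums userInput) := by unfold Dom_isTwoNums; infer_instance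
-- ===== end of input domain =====

-- B replaces A's stateful loop (group counter + prev-char flag) with a regex fullmatch of \d*\D+\d* (one maximal non-digit run); idiomatic, same cost.

-- int(c) on a single char succeeds exactly on decimal digits (on the ASCII domain: '0'..'9')
def pvIsDig (c : Char) : Bool := '0' ≤ c && c ≤ '9'

-- ===== PORT A =====
-- A's loop: fold over the characters maintaining (count, prevCharWasNum); returns count == 1
def isTwoNums (userInput : String) : Bool :=
  let st := userInput.toList.foldl
    (fun (st : Int × Bool) c =>
      if pvIsDig c then (st.1, true)
      else if st.2 then (st.1 + 1, false) else (st.1, false))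
    (0, true)
  st.1 == 1

-- ===== PORT B =====
-- Source B's re.fullmatch(r'\d*\D+\d*', s): skip the leading digit run, require at least one
-- non-digit, skip the non-digit run, and the rest must be all digits (greedy matching is
-- exact here because the character classes are disjoint).
def isTwoNums_alt (userInput : String) : Bool :=
  match userInput.toList.dropWhile pvIsDig with
  | [] => false
  | t@(_ :: _) => (t.dropWhile (fun c => !pvIsDig c)).all pvIsDig

-- ===== PRECONDITION & SPEC =====
def Spec_isTwoNums (userInput : String) (out : Bool) : Prop := out = isTwoNums_alt userInput
instance (userInput : String) (out : Bool) : Decidable (Spec_isTwoNums userInput out) := by unfold Spec_isTwoNums; infer_instance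

-- ===== CLAIM (what is proved, stated in full; the proofs are below) =====
def Claim_equal_isTwoNums : Prop := ∀ (userInput : String), Dom_isTwoNums userInput → Spec_isTwoNums userInput (isTwoNums userInput)

-- ===== LEMMAS AND PROOFS =====

-- number of maximal non-digit runs in l, given whether the previous char was a digit
def pvRuns : List Char → Bool → Nat
  | [], _ => 0
  | c :: cs, prev =>
    if pvIsDig c then pvRuns cs true
    else if prev then 1 + pvRuns cs false else pvRuns cs false

theorem pvFold_eq (l : List Char) : ∀ (n : Int) (b : Bool),
    (l.foldl (fun (st : Int × Bool) c =>
      if pvIsDig c then (st.1, true)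
      else if st.2 then (st.1 + 1, false) else (st.1, false)) (n, b)).1
    = n + (pvRuns l b : Int) := by
  induction l with
  | nil => intro n b; simp [pvRuns]
  | cons c cs ih =>
    intro n b
    by_cases h : pvIsDig c = true
    · simp [List.foldl, h, pvRuns, ih]
    · cases b <;> simp [List.foldl, h, pvRuns, ih] <;> omega

theorem pvAll_eq (l : List Char) : l.all pvIsDig = (pvRuns l true == 0) := by
  induction l with
  | nil => simp [pvRuns]
  | cons c cs ih =>
    by_cases h : pvIsDig c = true
    · simp [List.all_cons, h, pvRuns, ih]
    · simp [List.all_cons, h, pvRuns]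

theorem pvDrop_eq (l : List Char) :
    (l.dropWhile (fun c => !pvIsDig c)).all pvIsDig = (pvRuns l false == 0) := by
  induction l with
  | nil => simp [pvRuns]
  | cons c cs ih =>
    by_cases h : pvIsDig c = true
    · simp [h, pvRuns, List.all_cons, pvAll_eq]
    · simp [h, pvRuns, ih]

theorem pvAlt_eq (l : List Char) :
    (match l.dropWhile pvIsDig with
     | [] => false
     | t@(_ :: _) => (t.dropWhile (fun c => !pvIsDig c)).all pvIsDig)
    = (pvRuns l true == 1) := by
  induction l with
  | nil => simp [pvRuns]
  | cons c cs ih =>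
    by_cases h : pvIsDig c = true
    · simpa [List.dropWhile_cons, h, pvRuns] using ih
    · simp [h, pvRuns, pvDrop_eq]

-- ===== VERDICT (by name: the statement is the Claim_ definition above) =====
theorem isTwoNums_spec : Claim_equal_isTwoNums := by
  intro s _
  unfold Spec_isTwoNums isTwoNums isTwoNums_alt
  rw [pvAlt_eq]
  simp [pvFold_eq]
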